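-- pv_equiv track=rewrite | github.com/GrossManuelHTL/Sportsfreund | sportsfreund/src/model_trainer.py | _label_generic_phases
-- ===== SOURCE A (Python) =====
-- def _label_generic_phases(features):
--     """Generisches Phasen-Labeling für unbekannte Übungen"""
--     total_frames = len(features)
--     quarter = total_frames // 4
--
--     labels = []
--     for i in range(total_frames):
--         if i < quarter:
--             labels.append("start")
--         elif i < quarter * 2:
--             labels.append("down")
--         elif i < quarter * 3:
--             labels.append("bottom")
--         else:
--             labels.append("up")
--
--     return labels
-- ===== SOURCE B (Python) =====
-- def _label_generic_phases(features):
--     """Generisches Phasen-Labeling für unbekannte Übungen"""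
--     quarter = len(features) // 4
--     phases = ["start", "down", "bottom", "up"]
--     labels = []
--     phase_idx = 0
--     remaining = quarter
--     for _ in features:
--         while phase_idx < 3 and remaining == 0:
--             phase_idx += 1
--             remaining = quarter
--         labels.append(phases[phase_idx])
--         if remaining:
--             remaining -= 1
--     return labels
-- ===== Notes on version B (the rewrite author's own statement) =====
-- stated objective: alternative
-- what changed: B replaces the per-index threshold comparisons with a single-pass countdown state machine that consumes the frames, keeping a phase pointer and a per-phase budget and advancing the pointer whenever the budget runs out.
import Mathlib
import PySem

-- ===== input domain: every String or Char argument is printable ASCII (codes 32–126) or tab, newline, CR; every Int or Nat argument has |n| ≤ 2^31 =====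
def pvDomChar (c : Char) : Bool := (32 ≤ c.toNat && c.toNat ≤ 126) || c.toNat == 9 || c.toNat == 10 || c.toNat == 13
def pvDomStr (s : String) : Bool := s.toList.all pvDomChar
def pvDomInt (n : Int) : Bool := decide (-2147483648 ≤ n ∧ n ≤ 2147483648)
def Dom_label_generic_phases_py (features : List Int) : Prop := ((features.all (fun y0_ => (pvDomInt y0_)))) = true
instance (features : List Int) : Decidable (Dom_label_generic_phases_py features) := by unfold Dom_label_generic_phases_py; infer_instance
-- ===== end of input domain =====

-- B labels frames with a single-pass countdown state machine (phase pointer + per-phase budget)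
-- instead of branching on every index against quarter thresholds (objective: alternative).

-- ===== PORT A =====
def label_generic_phases_py (features : List Int) : List String :=
  let total_frames : Int := features.length
  let quarter : Int := PySem.Int.floordiv total_frames 4
  (PySem.List.pyRange 0 total_frames 1).foldl
    (fun labels i =>
      labels ++
        [if i < quarter then "start"
         else if i < quarter * 2 then "down"
         else if i < quarter * 3 then "bottom"
         else "up"]) []

-- ===== PORT B =====
-- the 'while phase_idx < 3 and remaining == 0' loop; terminates because phase_idx increases toward 3
def pvAdvance (quarter : Int) (phase_idx : Nat) (remaining : Int) : Nat × Int :=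
  if phase_idx < 3 ∧ remaining = 0 then pvAdvance quarter (phase_idx + 1) quarter
  else (phase_idx, remaining)
termination_by 3 - phase_idx

-- one iteration of B's for-loop body; phases[phase_idx] is ported with getD ""
-- (exact: phase_idx never exceeds 3, so the Python indexing never raises)
def pvStep (quarter : Int) (st : List String × Nat × Int) (_x : Int) : List String × Nat × Int :=
  let a := pvAdvance quarter st.2.1 st.2.2
  (st.1 ++ [(["start", "down", "bottom", "up"]).getD a.1 ""],
   a.1,
   if a.2 ≠ 0 then a.2 - 1 else a.2)

def label_generic_phases_py_alt (features : List Int) : List String :=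
  let quarter : Int := PySem.Int.floordiv (features.length : Int) 4
  (features.foldl (pvStep quarter) ([], 0, quarter)).1

-- ===== PRECONDITION & SPEC =====
def Spec_label_generic_phases_py (features : List Int) (out : List String) : Prop := out = label_generic_phases_py_alt features
instance (features : List Int) (out : List String) : Decidable (Spec_label_generic_phases_py features out) := by unfold Spec_label_generic_phases_py; infer_instance

-- ===== CLAIM (what is proved, stated in full; the proofs are below) =====
def Claim_equal_label_generic_phases_py : Prop := ∀ (features : List Int), Dom_label_generic_phases_py features → Spec_label_generic_phases_py features (label_generic_phases_py features)

-- ===== LEMMAS AND PROOFS =====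

-- the common normal form both ports are reduced to: four blocks by segment length
def pvBlocks (n : Int) : List String :=
  let q := n / 4
  List.replicate q.toNat "start" ++ List.replicate q.toNat "down"
    ++ List.replicate q.toNat "bottom" ++ List.replicate (n - 3 * q).toNat "up"

-- a map of a function constant on a range interval is a replicate of that constant
theorem map_pyRange_const (a b : Int) (f : Int → String) (c : String)
    (h : ∀ i, a ≤ i → i < b → f i = c) :
    (PySem.List.pyRange a b 1).map f = List.replicate (b - a).toNat c := by
  have hm : (PySem.List.pyRange a b 1).map f
      = (PySem.List.pyRange a b 1).map (fun _ => c) := by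
    apply List.map_congr_left
    intro i hi
    rw [PySem.List.mem_pyRange_one] at hi
    exact h i hi.1 hi.2
  rw [hm, List.map_const', PySem.List.length_pyRange_one]

-- A's port reduces to the block normal form
theorem A_eq_blocks (features : List Int) :
    label_generic_phases_py features = pvBlocks (features.length : Int) := by
  unfold label_generic_phases_py pvBlocks
  dsimp only
  set n : Int := (features.length : Int) with hn
  have hn0 : 0 ≤ n := Int.natCast_nonneg features.length
  rw [PySem.Int.floordiv_eq_ediv_of_pos (by norm_num : (0:Int) < 4)]
  set q : Int := n / 4 with hq
  have hq0 : 0 ≤ q := by omega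
  have h3q : 3 * q ≤ n := by omega
  rw [PySem.List.foldl_append_singleton_eq_map]
  rw [PySem.List.pyRange_one_append 0 q n hq0 (by omega)]
  rw [PySem.List.pyRange_one_append q (q * 2) n (by omega) (by omega)]
  rw [PySem.List.pyRange_one_append (q * 2) (q * 3) n (by omega) (by omega)]
  simp only [List.map_append]
  rw [map_pyRange_const 0 q _ "start"
        (by intro i h1 h2; rw [if_pos h2]),
      map_pyRange_const q (q * 2) _ "down"
        (by intro i h1 h2
            rw [if_neg (show ¬ i < q by omega), if_pos h2]),
      map_pyRange_const (q * 2) (q * 3) _ "bottom"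
        (by intro i h1 h2
            rw [if_neg (show ¬ i < q by omega), if_neg (show ¬ i < q * 2 by omega), if_pos h2]),
      map_pyRange_const (q * 3) n _ "up"
        (by intro i h1 h2
            rw [if_neg (show ¬ i < q by omega), if_neg (show ¬ i < q * 2 by omega),
                if_neg (show ¬ i < q * 3 by omega)])]
  have e1 : (q - 0).toNat = q.toNat := by omega
  have e2 : (q * 2 - q).toNat = q.toNat := by omega
  have e3 : (q * 3 - q * 2).toNat = q.toNat := by omega
  have e4 : (n - q * 3).toNat = (n - 3 * q).toNat := by omega
  rw [e1, e2, e3, e4, List.append_assoc, List.append_assoc, List.nil_append]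

-- symbolic trace of B's fold: the labels produced from state (pi, rem) over m more frames
def pvT (q : Int) (pi : Nat) (rem : Int) : Nat → List String
  | 0 => []
  | m + 1 =>
    let a := pvAdvance q pi rem
    (["start", "down", "bottom", "up"]).getD a.1 ""
      :: pvT q a.1 (if a.2 ≠ 0 then a.2 - 1 else a.2) m

theorem foldl_pvStep_eq_pvT (q : Int) (xs : List Int) (labels : List String) (pi : Nat) (rem : Int) :
    (xs.foldl (pvStep q) (labels, pi, rem)).1 = labels ++ pvT q pi rem xs.length := by
  induction xs generalizing labels pi rem with
  | nil => simp [pvT]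
  | cons x xs ih =>
    simp only [List.foldl_cons, List.length_cons, pvStep]
    rw [ih]
    simp [pvT, List.append_assoc]

theorem pvAdvance_stop (q : Int) (pi : Nat) (rem : Int) (h : ¬ (pi < 3 ∧ rem = 0)) :
    pvAdvance q pi rem = (pi, rem) := by
  rw [pvAdvance, if_neg h]

theorem pvT_up (q : Int) (m : Nat) : ∀ rem, pvT q 3 rem m = List.replicate m "up" := by
  induction m with
  | zero => intro rem; simp [pvT]
  | succ m ih =>
    intro rem
    simp only [pvT, pvAdvance_stop q 3 rem (by omega), List.replicate_succ]
    rw [ih]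
    rfl

-- while rem > 0 the machine emits its current phase label rem more times
theorem pvT_run (q : Int) (pi : Nat) :
    ∀ (k m : Nat), 0 < k → k ≤ m →
      pvT q pi (k : Int) m
        = List.replicate k ((["start", "down", "bottom", "up"]).getD pi "") ++ pvT q pi 0 (m - k) := by
  intro k
  induction k with
  | zero => intro m h; omega
  | succ k ih =>
    intro m _ hkm
    obtain ⟨m', rfl⟩ : ∃ m', m = m' + 1 := ⟨m - 1, by omega⟩
    have hstop : pvAdvance q pi ((k : Int) + 1) = (pi, (k : Int) + 1) :=
      pvAdvance_stop q pi _ (by omega)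
    simp only [pvT, Nat.cast_add, Nat.cast_one, hstop]
    have hne : ((k : Int) + 1) ≠ 0 := by omega
    rw [if_pos hne]
    have hdec : (k : Int) + 1 - 1 = (k : Int) := by omega
    rw [hdec]
    rcases Nat.eq_zero_or_pos k with hk0 | hk0
    · subst hk0
      simp [List.replicate_succ]
    · rw [ih m' hk0 (by omega)]
      simp [List.replicate_succ]

-- the same statement with an integer budget, as used in B's fold
theorem pvT_run' (q : Int) (pi : Nat) (hpi : pi < 3) (r : Int) (m : Nat)
    (hr : 0 < r) (hrm : r.toNat ≤ m) :
    pvT q pi r m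
      = List.replicate r.toNat ((["start", "down", "bottom", "up"]).getD pi "") ++ pvT q pi 0 (m - r.toNat) := by
  obtain ⟨k, rfl⟩ : ∃ k : Nat, r = (k : Int) := ⟨r.toNat, by omega⟩
  rw [Int.toNat_natCast]
  exact pvT_run q pi k m (by omega) (by omega)

-- when the budget is exhausted the machine behaves like the next phase with a fresh budget
theorem pvT_shift (q : Int) (hq : q ≠ 0) (pi : Nat) (hpi : pi < 3) (m : Nat) :
    pvT q pi 0 m = pvT q (pi + 1) q m := by
  cases m with
  | zero => simp [pvT]
  | succ m =>
    have h1 : pvAdvance q pi 0 = pvAdvance q (pi + 1) q := by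
      rw [pvAdvance, if_pos ⟨hpi, rfl⟩]
    simp only [pvT, h1]

-- B's port reduces to the same block normal form
theorem B_eq_blocks (features : List Int) :
    label_generic_phases_py_alt features = pvBlocks (features.length : Int) := by
  unfold label_generic_phases_py_alt pvBlocks
  dsimp only
  set n : Int := (features.length : Int) with hn
  have hn0 : 0 ≤ n := Int.natCast_nonneg features.length
  rw [PySem.Int.floordiv_eq_ediv_of_pos (by norm_num : (0:Int) < 4)]
  set q : Int := n / 4 with hq
  have hq0 : 0 ≤ q := by omega
  have h4q : 4 * q ≤ n := by omega
  have hlen : features.length = n.toNat := by omega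
  rw [foldl_pvStep_eq_pvT, List.nil_append, hlen]
  rcases eq_or_ne q 0 with hq0' | hqne
  · -- q = 0: the machine jumps straight to phase 3 and emits "up" n times
    rw [hq0']
    have hjump : ∀ m, pvT 0 0 0 m = List.replicate m "up" := by
      intro m
      cases m with
      | zero => simp [pvT]
      | succ m =>
        have h03 : pvAdvance 0 0 0 = (3, 0) := by
          rw [pvAdvance, if_pos (by omega)]
          rw [pvAdvance, if_pos (by omega)]
          rw [pvAdvance, if_pos (by omega)]
          exact pvAdvance_stop 0 3 0 (by omega)
        simp only [pvT, h03]
        rw [if_neg (by omega)]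
        rw [pvT_up]
        simp [List.replicate_succ]
    rw [hjump]
    simp
  · -- q > 0: run each of the three finite phases, then "up" for the remainder
    have hqpos : 0 < q := by omega
    have run3 : ∀ pi : Nat, pi < 3 → ∀ m : Nat, q.toNat ≤ m →
        pvT q pi q m
          = List.replicate q.toNat ((["start", "down", "bottom", "up"]).getD pi "")
              ++ pvT q (pi + 1) q (m - q.toNat) := by
      intro pi hpi m hm
      rw [pvT_run' q pi hpi q m hqpos hm, pvT_shift q hqne pi hpi]
    rw [run3 0 (by omega) n.toNat (by omega),
        run3 1 (by omega) _ (by omega),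
        run3 2 (by omega) _ (by omega)]
    rw [pvT_up]
    have : n.toNat - q.toNat - q.toNat - q.toNat = (n - 3 * q).toNat := by omega
    rw [this]
    simp [List.append_assoc]

-- ===== VERDICT (by name: the statement is the Claim_ definition above) =====
theorem label_generic_phases_py_spec : Claim_equal_label_generic_phases_py := by
  intro features _
  unfold Spec_label_generic_phases_py
  rw [A_eq_blocks, B_eq_blocks]
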